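-- pv_equiv track=rewrite | github.com/KamilKowalczuk/Nexus-System | app/agents/writer.py | _parse_research_summary
-- ===== SOURCE A (Python) =====
-- def _parse_research_summary(summary: str) -> dict:
--     """
--     Parsuje ai_analysis_summary zapisane przez researcher.py.
--     Zwraca słownik z kluczami: verified_contact_name, icebreaker, summary,
--     key_products, pain_points.
--     """
--     result = {
--         "verified_contact_name": None,
--         "icebreaker": "",
--         "summary": "",
--         "key_products": "",
--         "pain_points": "",
--     }
--     if not summary:
--         return result
--
--     for line in summary.splitlines():
--         if ": " not in line:
--             continue
--         key, _, val = line.partition(": ")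
--         key = key.strip()
--         val = val.strip()
--         if key == "VERIFIED_CONTACT_NAME":
--             result["verified_contact_name"] = None if val in ("NULL", "", "None") else val
--         elif key == "ICEBREAKER":
--             result["icebreaker"] = val if val not in ("Brak", "NULL", "") else ""
--         elif key == "SUMMARY":
--             result["summary"] = val
--         elif key == "KEY_PRODUCTS":
--             result["key_products"] = val
--         elif key == "PAIN_POINTS":
--             result["pain_points"] = val
--
--     return result
-- ===== SOURCE B (Python) =====
-- def _parse_research_summary(summary: str) -> dict:
--     """Key-driven decomposition: for each of the five known keys, scan the
--     lines in REVERSE order for the last colon-separated line (first match in the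
--     reversed list); normalize per key. No mutable result table, no per-line
--     five-way dispatch."""
--     rev = summary.splitlines()[::-1]
--
--     def last_val(key):
--         for line in rev:
--             if ": " in line:
--                 k, _, v = line.partition(": ")
--                 if k.strip() == key:
--                     return v.strip()
--         return None
--
--     name = last_val("VERIFIED_CONTACT_NAME")
--     ice = last_val("ICEBREAKER")
--     summ = last_val("SUMMARY")
--     prod = last_val("KEY_PRODUCTS")
--     pain = last_val("PAIN_POINTS")
--     return {
--         "verified_contact_name": None if name in (None, "NULL", "", "None") else name,
--         "icebreaker": "" if ice in (None, "Brak", "NULL", "") else ice,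
--         "summary": "" if summ is None else summ,
--         "key_products": "" if prod is None else prod,
--         "pain_points": "" if pain is None else pain,
--     }
-- ===== Notes on version B (the rewrite author's own statement) =====
-- stated objective: alternative
-- what changed: Replaces A's single pass that dispatches every line through a five-way branch into a mutated result dict with a key-driven decomposition: the lines are reversed once, then each of the five known keys independently scans the reversed lines for its first (i.e. last-in-text) matching colon-separated line and normalizes it; there is no result table and no per-line dispatch.
import Mathlib
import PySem

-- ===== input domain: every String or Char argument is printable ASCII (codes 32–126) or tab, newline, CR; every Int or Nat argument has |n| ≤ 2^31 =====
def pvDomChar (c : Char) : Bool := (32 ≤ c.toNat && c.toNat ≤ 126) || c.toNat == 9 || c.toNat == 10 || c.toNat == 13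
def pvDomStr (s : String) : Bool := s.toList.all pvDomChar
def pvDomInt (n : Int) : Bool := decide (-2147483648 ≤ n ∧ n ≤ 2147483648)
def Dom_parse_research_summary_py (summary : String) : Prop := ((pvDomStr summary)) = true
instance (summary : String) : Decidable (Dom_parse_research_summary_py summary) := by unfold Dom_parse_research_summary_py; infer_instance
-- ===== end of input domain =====

-- B replaces A's per-line five-way dispatch into a mutated result dict by five independent
-- backward searches, one per known key (first match in the reversed lines = last in the text).
-- ===== PORT A =====
-- line.partition(": ") is ported by hand as find/take/drop — exact here because the branch guard guarantees ": " occurs in line.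
def pvStepA (d : PySem.Dict String (Option String)) (line : List Char) : PySem.Dict String (Option String) :=
  if PySem.Chars.isIn ": ".toList line then
    let i := (PySem.Chars.find line ": ".toList).toNat
    let key := PySem.Chars.strip (line.take i)
    let val := PySem.Chars.strip (line.drop (i + 2))
    if key = "VERIFIED_CONTACT_NAME".toList then
      d.insert "verified_contact_name"
        (if val = "NULL".toList ∨ val = [] ∨ val = "None".toList then none else some (String.ofList val))
    else if key = "ICEBREAKER".toList then
      d.insert "icebreaker"
        (if ¬ (val = "Brak".toList ∨ val = "NULL".toList ∨ val = []) then some (String.ofList val) else some "")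
    else if key = "SUMMARY".toList then d.insert "summary" (some (String.ofList val))
    else if key = "KEY_PRODUCTS".toList then d.insert "key_products" (some (String.ofList val))
    else if key = "PAIN_POINTS".toList then d.insert "pain_points" (some (String.ofList val))
    else d
  else d

def pvInitA : PySem.Dict String (Option String) :=
  PySem.Dict.ofList
    [("verified_contact_name", none), ("icebreaker", some ""), ("summary", some ""),
     ("key_products", some ""), ("pain_points", some "")]

def parse_research_summary_py (summary : String) : List (String × Option String) :=
  if summary = "" then pvInitA.items
  else ((PySem.Chars.splitlines summary.toList).foldl pvStepA pvInitA).items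

-- ===== PORT B =====
-- last_val: first 'key: val' match scanning the (already reversed) line list.
-- line.partition(": ") ported by hand as find/take/drop — exact under the isIn guard.
def pvLastVal (key : List Char) : List (List Char) → Option (List Char)
  | [] => none
  | line :: rest =>
    if PySem.Chars.isIn ": ".toList line then
      let i := (PySem.Chars.find line ": ".toList).toNat
      if PySem.Chars.strip (line.take i) = key then some (PySem.Chars.strip (line.drop (i + 2)))
      else pvLastVal key rest
    else pvLastVal key rest

def parse_research_summary_py_alt (summary : String) : List (String × Option String) :=
  let rev := (PySem.Chars.splitlines summary.toList).reverse
  let name := pvLastVal "VERIFIED_CONTACT_NAME".toList rev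
  let ice := pvLastVal "ICEBREAKER".toList rev
  let summ := pvLastVal "SUMMARY".toList rev
  let prod := pvLastVal "KEY_PRODUCTS".toList rev
  let pain := pvLastVal "PAIN_POINTS".toList rev
  [("verified_contact_name",
      match name with
      | none => none
      | some v => if v = "NULL".toList ∨ v = [] ∨ v = "None".toList then none else some (String.ofList v)),
   ("icebreaker", some (String.ofList
      (match ice with
       | none => []
       | some v => if v = "Brak".toList ∨ v = "NULL".toList ∨ v = [] then [] else v))),
   ("summary", some (String.ofList (summ.getD []))),
   ("key_products", some (String.ofList (prod.getD []))),
   ("pain_points", some (String.ofList (pain.getD [])))]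

-- ===== PRECONDITION & SPEC =====
def Spec_parse_research_summary_py (summary : String) (out : List (String × Option String)) : Prop := out = parse_research_summary_py_alt summary
instance (summary : String) (out : List (String × Option String)) : Decidable (Spec_parse_research_summary_py summary out) := by unfold Spec_parse_research_summary_py; infer_instance

-- ===== CLAIM =====
def Claim_equal_parse_research_summary_py : Prop := ∀ (summary : String), Dom_parse_research_summary_py summary → Spec_parse_research_summary_py summary (parse_research_summary_py summary)

-- ===== LEMMAS AND PROOFS =====

-- the shape of B's output as a function of the five search results
def pvOut (n i s k p : Option (List Char)) : List (String × Option String) :=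
  [("verified_contact_name",
      match n with
      | none => none
      | some v => if v = "NULL".toList ∨ v = [] ∨ v = "None".toList then none else some (String.ofList v)),
   ("icebreaker", some (String.ofList
      (match i with
       | none => []
       | some v => if v = "Brak".toList ∨ v = "NULL".toList ∨ v = [] then [] else v))),
   ("summary", some (String.ofList (s.getD []))),
   ("key_products", some (String.ofList (k.getD []))),
   ("pain_points", some (String.ofList (p.getD [])))]

-- one backward-search step: what pvLastVal does when one more (later-in-text) line is prepended
def pvUpd (key : List Char) (line : List Char) (old : Option (List Char)) : Option (List Char) :=
  if PySem.Chars.isIn ": ".toList line then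
    if PySem.Chars.strip (line.take (PySem.Chars.find line ": ".toList).toNat) = key
    then some (PySem.Chars.strip (line.drop ((PySem.Chars.find line ": ".toList).toNat + 2)))
    else old
  else old

lemma pvLastVal_cons (key line : List Char) (ls : List (List Char)) :
    pvLastVal key (line :: ls) = pvUpd key line (pvLastVal key ls) := by
  simp only [pvLastVal, pvUpd]

lemma pvStepA_out (n i s k p : Option (List Char)) (line : List Char) :
    pvStepA (PySem.Dict.mk (pvOut n i s k p)) line =
      PySem.Dict.mk (pvOut (pvUpd "VERIFIED_CONTACT_NAME".toList line n)
                           (pvUpd "ICEBREAKER".toList line i)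
                           (pvUpd "SUMMARY".toList line s)
                           (pvUpd "KEY_PRODUCTS".toList line k)
                           (pvUpd "PAIN_POINTS".toList line p)) := by
  by_cases hin : PySem.Chars.isIn ": ".toList line = true
  · simp only [pvStepA, pvUpd, hin, if_true]
    generalize PySem.Chars.strip (List.take (PySem.Chars.find line ": ".toList).toNat line) = key
    generalize PySem.Chars.strip (List.drop ((PySem.Chars.find line ": ".toList).toNat + 2) line) = val
    by_cases h1 : key = "VERIFIED_CONTACT_NAME".toList
    · subst h1
      simp only [if_neg (show "VERIFIED_CONTACT_NAME".toList ≠ "ICEBREAKER".toList by decide),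
        if_neg (show "VERIFIED_CONTACT_NAME".toList ≠ "SUMMARY".toList by decide),
        if_neg (show "VERIFIED_CONTACT_NAME".toList ≠ "KEY_PRODUCTS".toList by decide),
        if_neg (show "VERIFIED_CONTACT_NAME".toList ≠ "PAIN_POINTS".toList by decide)]
      apply PySem.Dict.ext
      simp [pvOut, PySem.Dict.items_insert]
    · rw [if_neg h1]
      by_cases h2 : key = "ICEBREAKER".toList
      · subst h2
        simp only [if_neg (show "ICEBREAKER".toList ≠ "VERIFIED_CONTACT_NAME".toList by decide),
          if_neg (show "ICEBREAKER".toList ≠ "SUMMARY".toList by decide),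
          if_neg (show "ICEBREAKER".toList ≠ "KEY_PRODUCTS".toList by decide),
          if_neg (show "ICEBREAKER".toList ≠ "PAIN_POINTS".toList by decide)]
        have hval : (if ¬ (val = "Brak".toList ∨ val = "NULL".toList ∨ val = []) then some (String.ofList val) else some "") = some (String.ofList (if val = "Brak".toList ∨ val = "NULL".toList ∨ val = [] then [] else val)) := by
          by_cases hv : val = "Brak".toList ∨ val = "NULL".toList ∨ val = []
          · rw [if_neg (not_not_intro hv), if_pos hv]
          · rw [if_pos hv, if_neg hv]
        rw [hval]
        apply PySem.Dict.ext
        simp [pvOut, PySem.Dict.items_insert]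
      · rw [if_neg h2]
        by_cases h3 : key = "SUMMARY".toList
        · subst h3
          simp only [if_neg (show "SUMMARY".toList ≠ "VERIFIED_CONTACT_NAME".toList by decide),
            if_neg (show "SUMMARY".toList ≠ "ICEBREAKER".toList by decide),
            if_neg (show "SUMMARY".toList ≠ "KEY_PRODUCTS".toList by decide),
            if_neg (show "SUMMARY".toList ≠ "PAIN_POINTS".toList by decide)]
          apply PySem.Dict.ext
          simp [pvOut, PySem.Dict.items_insert]
        · rw [if_neg h3]
          by_cases h4 : key = "KEY_PRODUCTS".toList
          · subst h4
            simp only [if_neg (show "KEY_PRODUCTS".toList ≠ "VERIFIED_CONTACT_NAME".toList by decide),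
              if_neg (show "KEY_PRODUCTS".toList ≠ "ICEBREAKER".toList by decide),
              if_neg (show "KEY_PRODUCTS".toList ≠ "SUMMARY".toList by decide),
              if_neg (show "KEY_PRODUCTS".toList ≠ "PAIN_POINTS".toList by decide)]
            apply PySem.Dict.ext
            simp [pvOut, PySem.Dict.items_insert]
          · rw [if_neg h4]
            by_cases h5 : key = "PAIN_POINTS".toList
            · subst h5
              simp only [if_neg (show "PAIN_POINTS".toList ≠ "VERIFIED_CONTACT_NAME".toList by decide),
                if_neg (show "PAIN_POINTS".toList ≠ "ICEBREAKER".toList by decide),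
                if_neg (show "PAIN_POINTS".toList ≠ "SUMMARY".toList by decide),
                if_neg (show "PAIN_POINTS".toList ≠ "KEY_PRODUCTS".toList by decide)]
              apply PySem.Dict.ext
              simp [pvOut, PySem.Dict.items_insert]
            · rw [if_neg h5, if_neg h1, if_neg h2, if_neg h3, if_neg h4, if_neg h5]
  · simp only [pvStepA, pvUpd]
    rw [if_neg hin, if_neg hin, if_neg hin, if_neg hin, if_neg hin, if_neg hin]

lemma pvFold_eq (ls : List (List Char)) :
    ls.foldl pvStepA pvInitA =
      PySem.Dict.mk (pvOut (pvLastVal "VERIFIED_CONTACT_NAME".toList ls.reverse)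
                           (pvLastVal "ICEBREAKER".toList ls.reverse)
                           (pvLastVal "SUMMARY".toList ls.reverse)
                           (pvLastVal "KEY_PRODUCTS".toList ls.reverse)
                           (pvLastVal "PAIN_POINTS".toList ls.reverse)) := by
  induction ls using List.reverseRecOn with
  | nil => rfl
  | append_singleton ls l ih =>
      rw [List.foldl_append, List.foldl_cons, List.foldl_nil, ih, pvStepA_out,
          List.reverse_append, List.reverse_singleton, List.singleton_append,
          pvLastVal_cons, pvLastVal_cons, pvLastVal_cons, pvLastVal_cons, pvLastVal_cons]

-- ===== VERDICT =====
theorem parse_research_summary_py_spec : Claim_equal_parse_research_summary_py := by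
  intro summary _
  unfold Spec_parse_research_summary_py parse_research_summary_py parse_research_summary_py_alt
  by_cases h : summary = ""
  · subst h; rfl
  · rw [if_neg h, pvFold_eq]; rfl
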